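-- pv_equiv track=rewrite | github.com/hanakin/usaf-awards-and-decs-skill | scripts/validate_decoration_split_review.py | validate_math
-- ===== SOURCE A (Python) =====
-- from collections import Counter, defaultdict
--
-- def validate_math(rows: list[tuple[int, str, str, str]]) -> list[str]:
--     errors: list[str] = []
--     per_entry_counts: Counter[str] = Counter()
--     per_year_alq: defaultdict[str, Counter[str]] = defaultdict(Counter)
--
--     for _, epb_ref, _, _ in rows:
--         alq = epb_ref[0]
--         year = epb_ref[1:]
--         per_entry_counts[epb_ref] += 1
--         per_year_alq[year][alq] += 1
--
--     for epb_ref, count in sorted(per_entry_counts.items()):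
--         alq = epb_ref[0]
--         expected = 1 if alq == "H" else 2
--         if count != expected:
--             errors.append(
--                 f"{epb_ref} must produce {expected} split row(s); found {count}."
--             )
--
--     total_expected = 0
--     for year, counts in sorted(per_year_alq.items()):
--         expected_for_year = (
--             counts.get("E", 0)
--             + counts.get("L", 0)
--             + counts.get("M", 0)
--             + counts.get("I", 0)
--             + counts.get("H", 0)
--         )
--         # counts already reflect produced rows; compare against source-model expectations
--         source_expected = (
--             (1 if counts.get("E", 0) else 0) * 2
--             + (1 if counts.get("L", 0) else 0) * 2
--             + (1 if counts.get("M", 0) else 0) * 2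
--             + (1 if counts.get("I", 0) else 0) * 2
--             + (1 if counts.get("H", 0) else 0) * 1
--         )
--         total_expected += source_expected
--         if expected_for_year != source_expected:
--             errors.append(
--                 f"EPB {year} row count is wrong; expected {source_expected}, found {expected_for_year}."
--             )
--
--     if len(rows) != total_expected:
--         errors.append(
--             f"Total split-row count is wrong; expected {total_expected}, found {len(rows)}."
--         )
--
--     return errors
-- ===== SOURCE B (Python) =====
-- def validate_math(rows: list[tuple[int, str, str, str]]) -> list[str]:
--     errors: list[str] = []
--
--     # sort-then-scan: per-entry counts are run lengths in the sorted ref list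
--     refs = sorted(ref for _, ref, _, _ in rows)
--     n = len(refs)
--     i = 0
--     while i < n:
--         j = i + 1
--         while j < n and refs[j] == refs[i]:
--             j += 1
--         count = j - i
--         expected = 1 if refs[i][0] == "H" else 2
--         if count != expected:
--             errors.append(
--                 f"{refs[i]} must produce {expected} split row(s); found {count}."
--             )
--         i = j
--
--     # per-year data by scanning year-groups of the sorted (year, alq) pairs
--     pairs = sorted((ref[1:], ref[0]) for ref in refs)
--     m = len(pairs)
--     total_expected = 0
--     i = 0
--     while i < m:
--         year = pairs[i][0]
--         expected_for_year = 0
--         source_expected = 0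
--         prev_alq = None
--         j = i
--         while j < m and pairs[j][0] == year:
--             alq = pairs[j][1]
--             if alq in ("E", "L", "M", "I", "H"):
--                 expected_for_year += 1
--                 if alq != prev_alq:
--                     source_expected += 1 if alq == "H" else 2
--                 prev_alq = alq
--             j += 1
--         total_expected += source_expected
--         if expected_for_year != source_expected:
--             errors.append(
--                 f"EPB {year} row count is wrong; expected {source_expected}, found {expected_for_year}."
--             )
--         i = j
--
--     if len(rows) != total_expected:
--         errors.append(
--             f"Total split-row count is wrong; expected {total_expected}, found {len(rows)}."
--         )
--     return errors
-- ===== Notes on version B (the rewrite author's own statement) =====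
-- stated objective: alternative
-- what changed: B drops all dictionaries (Counter/defaultdict): it sorts the refs once and reads per-entry counts off run lengths of the sorted list, then sorts (year, alq) pairs and scans year-groups with a prev pointer to count distinct present ALQs, instead of hash-based counting passes.
import Mathlib
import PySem

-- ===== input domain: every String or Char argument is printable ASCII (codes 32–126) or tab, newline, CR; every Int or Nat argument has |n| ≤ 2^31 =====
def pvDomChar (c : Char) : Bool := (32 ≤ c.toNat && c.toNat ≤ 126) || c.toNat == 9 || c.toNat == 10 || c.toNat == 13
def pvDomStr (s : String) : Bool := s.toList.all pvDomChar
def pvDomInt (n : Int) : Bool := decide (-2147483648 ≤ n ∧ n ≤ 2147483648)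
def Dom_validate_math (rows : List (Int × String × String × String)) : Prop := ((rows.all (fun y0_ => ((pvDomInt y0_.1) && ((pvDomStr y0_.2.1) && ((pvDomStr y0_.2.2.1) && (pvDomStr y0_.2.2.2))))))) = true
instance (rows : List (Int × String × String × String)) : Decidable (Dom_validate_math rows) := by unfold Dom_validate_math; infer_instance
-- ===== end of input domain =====

-- B replaces A's hash-based counting (Counter / defaultdict(Counter)) by sort-then-scan:
-- per-entry counts are run lengths of the sorted ref list, per-year data come from scanning
-- year-groups of the sorted (year, alq) pairs with a prev pointer (objective: alternative).

-- shared primitive helpers: epb_ref[0] (as a 1-char string) and epb_ref[1:]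
def alqOf (s : String) : String :=
  match PySem.Str.pyGet? s 0 with
  | some c => String.ofList [c]
  | none => ""          -- unreachable under Pre_ (Python raises IndexError on "")

def yearOf (s : String) : String := PySem.Str.slice s (some 1) none

-- ===== PORT A =====
def validate_math (rows : List (Int × String × String × String)) : List String :=
  -- one loop over rows, two accumulators: per_entry_counts and per_year_alq (defaultdict(Counter))
  let st := rows.foldl
    (fun (s : PySem.Dict String Int × PySem.Dict String (PySem.Dict String Int)) r =>
      (s.1.modify r.2.1 0 (· + 1),
       s.2.modify (yearOf r.2.1) PySem.Dict.empty (fun c => c.modify (alqOf r.2.1) 0 (· + 1))))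
    (PySem.Dict.empty, PySem.Dict.empty)
  -- sorted(per_entry_counts.items()): Python compares the (str, int) tuples lexicographically
  let errors1 := (PySem.List.sorted2 st.1.items (·.1) (·.2)).foldl
    (fun errs p =>
      let expected : Int := if alqOf p.1 = "H" then 1 else 2
      if p.2 ≠ expected then
        errs ++ [p.1 ++ " must produce " ++ PySem.Int.toStr expected ++ " split row(s); found "
                 ++ PySem.Int.toStr p.2 ++ "."]
      else errs) []
  -- sorted(per_year_alq.items()): keys are distinct, so Python's tuple sort never reaches the
  -- second components (comparing Counters would raise TypeError); key sort by the year is exact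
  let res := (PySem.List.sorted st.2.items (·.1)).foldl
    (fun (acc : List String × Int) p =>
      let counts := p.2
      let expectedForYear : Int := counts.getD "E" 0 + counts.getD "L" 0 + counts.getD "M" 0
        + counts.getD "I" 0 + counts.getD "H" 0
      -- Python truthiness: counts.get(a, 0) is truthy iff ≠ 0
      let sourceExpected : Int := (if counts.getD "E" 0 ≠ 0 then 1 else 0) * 2
        + (if counts.getD "L" 0 ≠ 0 then 1 else 0) * 2
        + (if counts.getD "M" 0 ≠ 0 then 1 else 0) * 2
        + (if counts.getD "I" 0 ≠ 0 then 1 else 0) * 2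
        + (if counts.getD "H" 0 ≠ 0 then 1 else 0) * 1
      (if expectedForYear ≠ sourceExpected then
        acc.1 ++ ["EPB " ++ p.1 ++ " row count is wrong; expected " ++ PySem.Int.toStr sourceExpected
                  ++ ", found " ++ PySem.Int.toStr expectedForYear ++ "."]
       else acc.1,
       acc.2 + sourceExpected))
    (errors1, 0)
  if PySem.List.len rows ≠ res.2 then
    res.1 ++ ["Total split-row count is wrong; expected " ++ PySem.Int.toStr res.2 ++ ", found "
              ++ PySem.Int.toStr (PySem.List.len rows) ++ "."]
  else res.1

-- ===== PORT B =====
-- the outer while loop over the sorted refs: one step consumes one run (the inner 'while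
-- j < n and refs[j] == refs[i]' loop is the takeWhile/dropWhile split of the tail)
def scanEntriesB : List String → List String → List String
  | [], errs => errs
  | x :: rest, errs =>
    let run := rest.takeWhile (fun r => r == x)
    let count : Int := 1 + run.length
    let expected : Int := if alqOf x = "H" then 1 else 2
    scanEntriesB (rest.dropWhile (fun r => r == x))
      (if count ≠ expected then
        errs ++ [x ++ " must produce " ++ PySem.Int.toStr expected ++ " split row(s); found "
                 ++ PySem.Int.toStr count ++ "."]
      else errs)
termination_by l _ => l.length
decreasing_by simpa using Nat.lt_succ_of_le (List.length_dropWhile_le _ _)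

-- the outer while loop over the sorted (year, alq) pairs: one step consumes one year-group;
-- the inner while loop is the fold over that group with state (expected_for_year,
-- source_expected, prev_alq)
def scanYearsB : List (String × String) → List String × Int → List String × Int
  | [], acc => acc
  | p :: rest, acc =>
    let year := p.1
    let grp := p :: rest.takeWhile (fun q => q.1 == year)
    let st := grp.foldl
      (fun (st : Int × Int × Option String) q =>
        if q.2 ∈ (["E", "L", "M", "I", "H"] : List String) then
          (st.1 + 1,
           (if some q.2 ≠ st.2.2 then st.2.1 + (if q.2 = "H" then 1 else 2) else st.2.1),
           some q.2)
        else st) (0, 0, none)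
    scanYearsB (rest.dropWhile (fun q => q.1 == year))
      ((if st.1 ≠ st.2.1 then
          acc.1 ++ ["EPB " ++ year ++ " row count is wrong; expected " ++ PySem.Int.toStr st.2.1
                    ++ ", found " ++ PySem.Int.toStr st.1 ++ "."]
        else acc.1),
       acc.2 + st.2.1)
termination_by l _ => l.length
decreasing_by simpa using Nat.lt_succ_of_le (List.length_dropWhile_le _ _)

def validate_math_alt (rows : List (Int × String × String × String)) : List String :=
  let refs := PySem.List.sorted (rows.map (fun r => r.2.1)) (fun x => x)
  let errors1 := scanEntriesB refs []
  let pairs := PySem.List.sorted2 (refs.map (fun r => (yearOf r, alqOf r))) (·.1) (·.2)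
  let res := scanYearsB pairs (errors1, 0)
  if PySem.List.len rows ≠ res.2 then
    res.1 ++ ["Total split-row count is wrong; expected " ++ PySem.Int.toStr res.2 ++ ", found "
              ++ PySem.Int.toStr (PySem.List.len rows) ++ "."]
  else res.1

-- ===== PRECONDITION & SPEC =====
-- Pre_ excludes rows whose epb_ref is "": there Python A raises IndexError on epb_ref[0] (and B too).
def Pre_validate_math (rows : List (Int × String × String × String)) : Prop :=
  ∀ r ∈ rows, r.2.1 ≠ ""
instance (rows : List (Int × String × String × String)) : Decidable (Pre_validate_math rows) := by
  unfold Pre_validate_math; infer_instance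

def pvWitness_validate_math : (List (Int × String × String × String)) :=
  [(1, "E2021", "a", "b"), (2, "E2021", "c", "d"), (3, "H2021", "e", "f")]

def Spec_validate_math (rows : List (Int × String × String × String)) (out : List String) : Prop := out = validate_math_alt rows
instance (rows : List (Int × String × String × String)) (out : List String) : Decidable (Spec_validate_math rows out) := by unfold Spec_validate_math; infer_instance

-- ===== CLAIM (what is proved, stated in full; the proofs are below) =====
def Claim_equal_validate_math : Prop := ∀ (rows : List (Int × String × String × String)), Dom_validate_math rows → Pre_validate_math rows → Spec_validate_math rows (validate_math rows)

-- ===== LEMMAS AND PROOFS =====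

-- proof-side abbreviations
def fiveL : List String := ["E", "L", "M", "I", "H"]

def wOf (a : String) : Int := if a ∈ fiveL then (if a = "H" then 1 else 2) else 0

def innerStep (st : Int × Int × Option String) (a : String) : Int × Int × Option String :=
  if a ∈ fiveL then
    (st.1 + 1,
     (if some a ≠ st.2.2 then st.2.1 + (if a = "H" then 1 else 2) else st.2.1),
     some a)
  else st

def pairBody (st : Int × Int × Option String) (q : String × String) : Int × Int × Option String :=
  if q.2 ∈ (["E", "L", "M", "I", "H"] : List String) then
    (st.1 + 1,
     (if some q.2 ≠ st.2.2 then st.2.1 + (if q.2 = "H" then 1 else 2) else st.2.1),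
     some q.2)
  else st

def prevAfter (K : List String) (pv : Option String) : Option String :=
  K.foldl (fun pv k => if k ∈ fiveL then some k else pv) pv

-- sorted distinct values
def Kd (l : List String) : List String := PySem.List.sorted (PySem.Set.ofList l) (fun x => x)

def flatRep (l : List String) : List String :=
  (Kd l).flatMap (fun k => List.replicate (l.count k) k)

def perYearA (refs : List String) : PySem.Dict String (PySem.Dict String Int) :=
  refs.foldl (fun d k => d.modify (yearOf k) PySem.Dict.empty
    (fun c => c.modify (alqOf k) 0 (· + 1))) PySem.Dict.empty

def pairF (r : String) : String × String := (yearOf r, alqOf r)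

def AyOf (refs : List String) (y : String) : List String :=
  ((refs.map pairF).filter (fun p => p.1 == y)).map (·.2)

-- ---- generic order/sort lemmas ----

theorem s2lex {κ1 κ2 : Type} [LinearOrder κ1] [LinearOrder κ2] (xs : List (κ1 × κ2)) :
    PySem.List.sorted2 xs (·.1) (·.2) = PySem.List.sorted xs (fun p => toLex p) := by
  rw [PySem.List.sorted_eq_foldl_insertBy]
  simp only [PySem.List.sorted2, Bool.false_eq_true, if_neg, ite_false]
  have hb : (fun (a b : κ1 × κ2) => decide (a.1 < b.1) || !decide (b.1 < a.1) && decide (a.2 < b.2))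
      = (fun (a b : κ1 × κ2) => decide ((toLex a : Lex (κ1 × κ2)) < toLex b)) := by
    funext a b
    by_cases h1 : a.1 < b.1
    · simp [h1, Prod.Lex.lt_iff]
    · by_cases h2 : b.1 < a.1
      · have hne : a.1 ≠ b.1 := fun h => absurd (h ▸ h2) (lt_irrefl _)
        simp [h1, h2, Prod.Lex.lt_iff, hne]
      · have heq : a.1 = b.1 := le_antisymm (not_lt.mp h2) (not_lt.mp h1)
        simp [h1, h2, Prod.Lex.lt_iff, heq]
  rw [hb]

theorem sorted2_pairs_eq {κ1 κ2 : Type} [LinearOrder κ1] [LinearOrder κ2]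
    (xs ys : List (κ1 × κ2)) (hperm : ys.Perm xs)
    (hpw : ys.Pairwise (fun a b => a.1 < b.1 ∨ (a.1 = b.1 ∧ a.2 ≤ b.2))) :
    PySem.List.sorted2 xs (·.1) (·.2) = ys := by
  rw [s2lex]
  refine PySem.List.eq_of_perm_of_pairwise_le_of_injective (fun p => toLex p) toLex.injective
    ((PySem.List.sorted_perm xs _ false).trans hperm.symm) (PySem.List.sorted_pairwise xs _) ?_
  exact hpw.imp (fun h => Prod.Lex.le_iff.mpr h)

theorem Kd_pairwise_lt (l : List String) : (Kd l).Pairwise (· < ·) :=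
  PySem.List.sorted_ofList_pairwise_lt l

theorem Kd_nodup (l : List String) : (Kd l).Nodup :=
  (Kd_pairwise_lt l).imp ne_of_lt

theorem mem_Kd {l : List String} {x : String} : x ∈ Kd l ↔ x ∈ l := by
  rw [Kd, PySem.List.mem_sorted, PySem.Set.mem_ofList]

theorem count_flatKd (K : List String) (hnd : K.Nodup) (c : String → Nat) (x : String) :
    (K.flatMap (fun k => List.replicate (c k) k)).count x = if x ∈ K then c x else 0 := by
  induction K with
  | nil => simp
  | cons k t ih =>
    rw [List.flatMap_cons, List.count_append, ih hnd.of_cons]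
    by_cases hx : x = k
    · subst hx
      have : x ∉ t := (List.nodup_cons.mp hnd).1
      simp [this, List.count_replicate]
    · have : (k == x) = false := by simp [beq_eq_false_iff_ne]; exact fun h => hx h.symm
      simp [List.count_replicate, this, hx]

theorem pw_flatKd (K : List String) (c : String → Nat) (hpw : K.Pairwise (· < ·)) :
    (K.flatMap (fun k => List.replicate (c k) k)).Pairwise (· ≤ ·) := by
  induction K with
  | nil => simp
  | cons k t ih =>
    rw [List.flatMap_cons, List.pairwise_append]
    refine ⟨(List.pairwise_replicate).mpr (Or.inr le_rfl), ih hpw.of_cons, ?_⟩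
    intro a ha b hb
    have hak := List.eq_of_mem_replicate ha
    obtain ⟨k', hk', hbk⟩ := List.mem_flatMap.mp hb
    subst hak; rw [List.eq_of_mem_replicate hbk]
    exact le_of_lt (List.rel_of_pairwise_cons hpw hk')

-- the sorted list is the concatenation of its runs: distinct values in order, each repeated
theorem flat_eq (l : List String) :
    PySem.List.sorted l (fun x => x) = flatRep l := by
  apply PySem.List.sorted_id_eq_of_perm_of_pairwise
  · rw [List.perm_iff_count]
    intro a
    rw [flatRep, count_flatKd _ (Kd_nodup l)]
    by_cases ha : a ∈ Kd l
    · simp [ha]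
    · have : a ∉ l := fun h => ha (mem_Kd.mpr h)
      simp [ha, List.count_eq_zero.mpr this]
  · exact pw_flatKd (Kd l) _ (Kd_pairwise_lt l)

-- takeWhile/dropWhile on a block followed by failing elements
theorem run_split {α : Type} (p : α → Bool) (l1 l2 : List α)
    (h1 : ∀ x ∈ l1, p x = true) (h2 : ∀ x ∈ l2, p x = false) :
    (l1 ++ l2).takeWhile p = l1 ∧ (l1 ++ l2).dropWhile p = l2 := by
  induction l1 with
  | nil =>
    simp only [List.nil_append]
    cases l2 with
    | nil => simp
    | cons y t =>
      have := h2 y (List.mem_cons_self ..)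
      rw [List.takeWhile_cons, List.dropWhile_cons]
      simp [this]
  | cons x t ih =>
    have hx := h1 x (List.mem_cons_self ..)
    have := ih (fun z hz => h1 z (List.mem_cons_of_mem _ hz))
    rw [List.cons_append, List.takeWhile_cons, List.dropWhile_cons]
    simp [hx, this.1, this.2]

-- ---- entries pass ----

theorem scan1 (K : List String) (c : String → Nat) (errs : List String)
    (hpw : K.Pairwise (· < ·)) (hc : ∀ k ∈ K, 1 ≤ c k) :
    scanEntriesB (K.flatMap (fun k => List.replicate (c k) k)) errs
      = K.foldl (fun errs k =>
          let expected : Int := if alqOf k = "H" then 1 else 2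
          if (c k : Int) ≠ expected then
            errs ++ [k ++ " must produce " ++ PySem.Int.toStr expected ++ " split row(s); found "
                     ++ PySem.Int.toStr (c k : Int) ++ "."]
          else errs) errs := by
  induction K generalizing errs with
  | nil => simp [scanEntriesB]
  | cons k t ih =>
    obtain ⟨n, hn⟩ : ∃ n, c k = n + 1 :=
      ⟨c k - 1, by have := hc k (List.mem_cons_self ..); omega⟩
    rw [List.flatMap_cons, hn, List.replicate_succ, List.cons_append]
    have hrest : ∀ y ∈ t.flatMap (fun k => List.replicate (c k) k), (y == k) = false := by
      intro y hy
      obtain ⟨k', hk', hyk⟩ := List.mem_flatMap.mp hy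
      have : y = k' := List.eq_of_mem_replicate hyk
      subst this
      have := List.rel_of_pairwise_cons hpw hk'
      simp [beq_eq_false_iff_ne]
      exact fun h => absurd (h ▸ this) (lt_irrefl _)
    have hrepl : ∀ y ∈ List.replicate n k, (y == k) = true := by
      intro y hy; simp [List.eq_of_mem_replicate hy]
    obtain ⟨ht, hd⟩ := run_split (fun r => r == k) (List.replicate n k) _ hrepl hrest
    rw [scanEntriesB]
    simp only [ht, hd, List.length_replicate]
    have hcast : (1 : Int) + (n : Int) = ((c k : Nat) : Int) := by rw [hn]; push_cast; ring
    rw [hcast]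
    rw [ih _ hpw.of_cons (fun z hz => hc z (List.mem_cons_of_mem _ hz))]
    rw [List.foldl_cons]

-- ---- per-year pass ----

theorem flatMap_congr' {α β : Type} (l : List α) (f g : α → List β)
    (h : ∀ a ∈ l, f a = g a) : l.flatMap f = l.flatMap g := by
  induction l with
  | nil => rfl
  | cons x t ih =>
    rw [List.flatMap_cons, List.flatMap_cons, h x (List.mem_cons_self ..),
      ih (fun a ha => h a (List.mem_cons_of_mem _ ha))]

theorem permflat {α β : Type} (l : List α) (f g : α → List β)
    (h : ∀ a ∈ l, (f a).Perm (g a)) : (l.flatMap f).Perm (l.flatMap g) := by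
  induction l with
  | nil => simp
  | cons x t ih =>
    rw [List.flatMap_cons, List.flatMap_cons]
    exact (h x (List.mem_cons_self ..)).append (ih (fun a ha => h a (List.mem_cons_of_mem _ ha)))

theorem part_perm (Y : List String) (pl : List (String × String)) (hnd : Y.Nodup)
    (hcov : ∀ p ∈ pl, p.1 ∈ Y) :
    (Y.flatMap (fun y => pl.filter (fun p => p.1 == y))).Perm pl := by
  induction Y generalizing pl with
  | nil =>
    have : pl = [] := by
      cases pl with
      | nil => rfl
      | cons p t => simpa using hcov p (List.mem_cons_self ..)
    simp [this]
  | cons y t ih =>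
    rw [List.flatMap_cons]
    have hstep : ∀ y' ∈ t, pl.filter (fun p => p.1 == y')
        = (pl.filter (fun p => !(p.1 == y))).filter (fun p => p.1 == y') := by
      intro y' hy'
      rw [List.filter_filter]
      apply List.filter_congr
      intro p _
      by_cases h : p.1 = y'
      · have : ¬ p.1 = y := fun hh => (List.nodup_cons.mp hnd).1 (hh ▸ h ▸ hy')
        simp [h, this]
        exact fun hh => (List.nodup_cons.mp hnd).1 (hh ▸ hy')
      · simp [h]
    rw [flatMap_congr' t _ _ hstep]
    have hcov' : ∀ p ∈ pl.filter (fun p => !(p.1 == y)), p.1 ∈ t := by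
      intro p hp
      have hm := List.mem_of_mem_filter hp
      have hprop := List.of_mem_filter hp
      have := hcov p hm
      rcases List.mem_cons.mp this with h | h
      · exfalso; simp [h] at hprop
      · exact h
    exact (List.Perm.append_left _ (ih _ (List.nodup_cons.mp hnd).2 hcov')).trans
      (List.filter_append_perm _ pl)

theorem scanYearsB_step (y a0 : String) (rest : List (String × String)) (acc : List String × Int) :
    scanYearsB ((y, a0) :: rest) acc
      = scanYearsB (rest.dropWhile (fun q => q.1 == y))
          ((if (((y, a0) :: rest.takeWhile (fun q => q.1 == y)).foldl pairBody (0, 0, none)).1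
              ≠ (((y, a0) :: rest.takeWhile (fun q => q.1 == y)).foldl pairBody (0, 0, none)).2.1 then
              acc.1 ++ ["EPB " ++ y ++ " row count is wrong; expected "
                ++ PySem.Int.toStr ((((y, a0) :: rest.takeWhile (fun q => q.1 == y)).foldl pairBody (0, 0, none)).2.1)
                ++ ", found " ++ PySem.Int.toStr ((((y, a0) :: rest.takeWhile (fun q => q.1 == y)).foldl pairBody (0, 0, none)).1) ++ "."]
            else acc.1),
           acc.2 + (((y, a0) :: rest.takeWhile (fun q => q.1 == y)).foldl pairBody (0, 0, none)).2.1) := by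
  rw [scanYearsB]; rfl

theorem scany (Y : List String) (g : String → List String) (acc : List String × Int)
    (hpw : Y.Pairwise (· < ·)) (hne : ∀ y ∈ Y, g y ≠ []) :
    scanYearsB (Y.flatMap (fun y => (g y).map (fun a => (y, a)))) acc
      = Y.foldl (fun acc y =>
          let st := (g y).foldl innerStep (0, 0, none)
          ((if st.1 ≠ st.2.1 then
              acc.1 ++ ["EPB " ++ y ++ " row count is wrong; expected " ++ PySem.Int.toStr st.2.1
                        ++ ", found " ++ PySem.Int.toStr st.1 ++ "."]
            else acc.1),
           acc.2 + st.2.1)) acc := by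
  induction Y generalizing acc with
  | nil => simp [scanYearsB]
  | cons y t ih =>
    rw [List.flatMap_cons]
    obtain ⟨a0, g0, hg⟩ : ∃ a0 g0, g y = a0 :: g0 := by
      cases hgy : g y with
      | nil => exact absurd hgy (hne y (List.mem_cons_self ..))
      | cons a0 g0 => exact ⟨a0, g0, rfl⟩
    rw [hg, List.map_cons, List.cons_append]
    have hrest : ∀ q ∈ t.flatMap (fun y' => (g y').map (fun a => (y', a))), (q.1 == y) = false := by
      intro q hq
      obtain ⟨y', hy', hqy⟩ := List.mem_flatMap.mp hq
      obtain ⟨a, _, rfl⟩ := List.mem_map.mp hqy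
      have := List.rel_of_pairwise_cons hpw hy'
      simp only [beq_eq_false_iff_ne, ne_eq]
      exact fun h => absurd (h ▸ this) (lt_irrefl _)
    have hgrp : ∀ q ∈ g0.map (fun a => (y, a)), (q.1 == y) = true := by
      intro q hq
      obtain ⟨a, _, rfl⟩ := List.mem_map.mp hq
      simp
    obtain ⟨ht, hd⟩ := run_split (fun q => q.1 == y) (g0.map (fun a => (y, a))) _ hgrp hrest
    rw [scanYearsB_step, ht, hd]
    have hfold : ((y, a0) :: g0.map (fun a => (y, a))).foldl pairBody (0, 0, none)
        = (g y).foldl innerStep (0, 0, none) := by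
      rw [hg]
      rw [show ((y, a0) :: g0.map (fun a => (y, a))) = ((a0 :: g0).map (fun a => (y, a))) from rfl,
        List.foldl_map]
      rfl
    rw [hfold]
    rw [ih _ hpw.of_cons (fun z hz => hne z (List.mem_cons_of_mem _ hz))]
    rw [List.foldl_cons]

theorem block_nonfive (a : String) (ha : a ∉ fiveL) (n : Nat) (st : Int × Int × Option String) :
    (List.replicate n a).foldl innerStep st = st := by
  induction n generalizing st with
  | zero => rfl
  | succ m ih => rw [List.replicate_succ, List.foldl_cons, innerStep, if_neg (by simpa using ha)]; exact ih st

theorem block_five_rest (a : String) (ha : a ∈ fiveL) (m : Nat) (e s : Int) :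
    (List.replicate m a).foldl innerStep (e, s, some a) = (e + m, s, some a) := by
  induction m generalizing e with
  | zero => simp
  | succ m ih =>
    rw [List.replicate_succ, List.foldl_cons, innerStep, if_pos (by simpa using ha)]
    simp only [ne_eq, not_true_eq_false, if_false]
    rw [ih (e + 1)]
    simp only [Prod.mk.injEq]
    refine ⟨by push_cast; ring, trivial⟩

theorem block_eval (a : String) (n : Nat) (hn : 1 ≤ n) (st : Int × Int × Option String)
    (hpv : st.2.2 ≠ some a) :
    (List.replicate n a).foldl innerStep st
      = (st.1 + (if a ∈ fiveL then (n : Int) else 0), st.2.1 + wOf a,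
         if a ∈ fiveL then some a else st.2.2) := by
  by_cases ha : a ∈ fiveL
  · obtain ⟨m, rfl⟩ : ∃ m, n = m + 1 := ⟨n - 1, by omega⟩
    obtain ⟨e, s, pv⟩ := st
    rw [List.replicate_succ, List.foldl_cons, innerStep, if_pos (by simpa using ha)]
    simp only at hpv
    rw [if_pos (fun h => hpv h.symm)]
    rw [block_five_rest a ha m]
    simp only [wOf, ha, if_true, Prod.mk.injEq, if_pos]
    refine ⟨by push_cast; ring, trivial⟩
  · rw [block_nonfive a ha n st]
    simp [wOf, ha]

theorem inner_eval (K : List String) (c : String → Nat) (st : Int × Int × Option String)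
    (hnd : K.Nodup) (hc : ∀ k ∈ K, 1 ≤ c k) (hpv : ∀ k ∈ K, st.2.2 ≠ some k) :
    (K.flatMap (fun k => List.replicate (c k) k)).foldl innerStep st
      = (st.1 + (K.map (fun k => if k ∈ fiveL then (c k : Int) else 0)).sum,
         st.2.1 + (K.map wOf).sum,
         prevAfter K st.2.2) := by
  induction K generalizing st with
  | nil => simp [prevAfter]
  | cons k t ih =>
    rw [List.flatMap_cons, List.foldl_append]
    rw [block_eval k (c k) (hc k (List.mem_cons_self ..)) st (hpv k (List.mem_cons_self ..))]
    rw [ih _ hnd.of_cons (fun z hz => hc z (List.mem_cons_of_mem _ hz)) ?hpv']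
    case hpv' =>
      intro z hz
      by_cases hk : k ∈ fiveL
      · simp only [if_pos hk]
        intro h
        have : k = z := by injection h
        exact absurd (this ▸ hz) (List.nodup_cons.mp hnd).1
      · simp only [if_neg hk]
        exact hpv z (List.mem_cons_of_mem _ hz)
    simp only [List.map_cons, List.sum_cons, prevAfter, List.foldl_cons, Prod.mk.injEq]
    refine ⟨by ring, by ring, trivial⟩

-- ---- counting identities ----

theorem count5 (l : List String) :
    l.count "E" + l.count "L" + l.count "M" + l.count "I" + l.count "H"
      = l.countP (fun a => decide (a ∈ fiveL)) := by
  induction l with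
  | nil => simp
  | cons x t ih =>
    simp only [List.count_cons, List.countP_cons]
    by_cases hx : x ∈ fiveL
    · have : (decide (x ∈ fiveL)) = true := by simp [hx]
      simp only [fiveL, List.mem_cons, List.not_mem_nil, or_false] at hx
      rcases hx with rfl | rfl | rfl | rfl | rfl <;> simp [this] <;> omega
    · have hd : (decide (x ∈ fiveL)) = false := by simp [hx]
      simp only [fiveL, List.mem_cons, List.not_mem_nil, or_false, not_or] at hx
      obtain ⟨h1, h2, h3, h4, h5⟩ := hx
      have b1 : (x == "E") = false := by simp [h1]
      have b2 : (x == "L") = false := by simp [h2]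
      have b3 : (x == "M") = false := by simp [h3]
      have b4 : (x == "I") = false := by simp [h4]
      have b5 : (x == "H") = false := by simp [h5]
      simp [b1, b2, b3, b4, b5, hd, ih]

theorem sum_ite_filter (l : List String) (p : String → Bool) (f : String → Int) :
    (l.map (fun k => if p k then f k else 0)).sum = ((l.filter p).map f).sum := by
  induction l with
  | nil => rfl
  | cons x t ih =>
    rw [List.map_cons, List.sum_cons, List.filter_cons]
    by_cases hx : p x
    · simp [hx, ih]
    · simp [hx, ih]

theorem sum_ite_single (K : List String) (hnd : K.Nodup) (X : String) (cX : Int) :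
    (K.map (fun k => if k = X then cX else 0)).sum = if X ∈ K then cX else 0 := by
  induction K with
  | nil => simp
  | cons k t ih =>
    rw [List.map_cons, List.sum_cons, ih (List.nodup_cons.mp hnd).2]
    by_cases hk : k = X
    · subst hk
      have : k ∉ t := (List.nodup_cons.mp hnd).1
      simp [this]
    · have : (X ∈ k :: t) ↔ X ∈ t := by
        simp [List.mem_cons]; intro h; exact absurd h.symm hk
      simp [hk, this]

-- sum of per-distinct-value counts over a filter = countP (F2core)
theorem F2core (refs : List String) (Q : String → Bool) :
    (((PySem.Set.ofList refs).filter Q).map (fun k => (refs.count k : Int))).sum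
      = (refs.countP Q : Int) := by
  have hperm : (PySem.Set.ofList refs).Perm refs.dedup := by
    rw [List.perm_ext_iff_of_nodup (PySem.Set.nodup_ofList refs) refs.nodup_dedup]
    intro a; rw [PySem.Set.mem_ofList, List.mem_dedup]
  have h2 : (((PySem.Set.ofList refs).filter Q).map (fun k => (refs.count k : Int))).sum
      = ((refs.dedup.filter Q).map (fun k => (refs.count k : Int))).sum :=
    ((hperm.filter Q).map _).sum_eq
  rw [h2]
  have h3 : ((refs.dedup.filter Q).map (fun k => (refs.count k : Int))).sum
      = (((refs.dedup.filter Q).map (fun k => refs.count k)).sum : Int) := by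
    rw [Nat.cast_list_sum, List.map_map]; rfl
  rw [h3, List.sum_map_count_dedup_filter_eq_countP]

theorem sumw (K : List String) (hnd : K.Nodup) :
    (K.map wOf).sum
      = (if "E" ∈ K then (1:Int) else 0) * 2 + (if "L" ∈ K then (1:Int) else 0) * 2
        + (if "M" ∈ K then (1:Int) else 0) * 2 + (if "I" ∈ K then (1:Int) else 0) * 2
        + (if "H" ∈ K then (1:Int) else 0) * 1 := by
  have hw : ∀ k, wOf k = (if k = "E" then (2:Int) else 0) + (if k = "L" then (2:Int) else 0)
      + (if k = "M" then (2:Int) else 0) + (if k = "I" then (2:Int) else 0)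
      + (if k = "H" then (1:Int) else 0) := by
    intro k
    by_cases h1 : k = "E"
    · subst h1; decide
    by_cases h2 : k = "L"
    · subst h2; decide
    by_cases h3 : k = "M"
    · subst h3; decide
    by_cases h4 : k = "I"
    · subst h4; decide
    by_cases h5 : k = "H"
    · subst h5; decide
    simp [wOf, fiveL, h1, h2, h3, h4, h5]
  have hsplit : ∀ (L : List String), (L.map wOf).sum
      = (L.map (fun k => if k = "E" then (2:Int) else 0)).sum
        + (L.map (fun k => if k = "L" then (2:Int) else 0)).sum
        + (L.map (fun k => if k = "M" then (2:Int) else 0)).sum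
        + (L.map (fun k => if k = "I" then (2:Int) else 0)).sum
        + (L.map (fun k => if k = "H" then (1:Int) else 0)).sum := by
    intro L
    induction L with
    | nil => simp
    | cons k t ih =>
      simp only [List.map_cons, List.sum_cons, ih, hw k]
      ring
  rw [hsplit K, sum_ite_single K hnd, sum_ite_single K hnd, sum_ite_single K hnd,
    sum_ite_single K hnd, sum_ite_single K hnd]
  split_ifs <;> ring

-- ---- A-side characterisations (per-entry counter and nested dict) ----

theorem L1 (l : List String) (d : PySem.Dict String (PySem.Dict String Int)) (y a : String) :
    ((l.foldl (fun d k => d.modify (yearOf k) PySem.Dict.empty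
        (fun c => c.modify (alqOf k) 0 (· + 1))) d).getD y PySem.Dict.empty).getD a 0
      = (d.getD y PySem.Dict.empty).getD a 0
        + (l.countP (fun k => yearOf k == y && alqOf k == a) : Int) := by
  induction l generalizing d with
  | nil => simp
  | cons k t ih =>
    simp only [List.foldl_cons, List.countP_cons, ih]
    rw [PySem.Dict.getD_modify]
    by_cases hy : y = yearOf k
    · subst hy; simp only [if_pos trivial]
      rw [PySem.Dict.getD_modify]
      by_cases ha : a = alqOf k
      · subst ha; simp; ring
      · have hne : (alqOf k == a) = false := by
          simp only [beq_eq_false_iff_ne, ne_eq]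
          exact fun h => ha h.symm
        simp [ha, hne]
    · have : ¬ (yearOf k == y && alqOf k == a) = true := by
        simp [beq_iff_eq]; intro h; exact absurd h.symm hy
      simp [if_neg hy, this]

theorem hterm (refs : List String) (y a : String) :
    ((perYearA refs).getD y PySem.Dict.empty).getD a 0
      = (refs.countP (fun k => yearOf k == y && alqOf k == a) : Int) := by
  rw [perYearA, L1]
  simp [PySem.Dict.getD_empty]

-- sorted items of the nested dict = sorted distinct years, paired with their counters
theorem items_sorted (refs : List String) :
    PySem.List.sorted (perYearA refs).items (·.1)
      = (Kd (refs.map yearOf)).map (fun y => (y, (perYearA refs).getD y PySem.Dict.empty)) := by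
  have hknd : (perYearA refs).keys.Nodup := by
    rw [perYearA]
    exact PySem.Dict.nodup_keys_foldl_modify_key refs yearOf PySem.Dict.empty
      (fun _ k => fun c => c.modify (alqOf k) 0 (· + 1)) PySem.Dict.empty
      (by simp)
  have hkeys : (perYearA refs).keys = PySem.Set.ofList (refs.map yearOf) := by
    rw [perYearA]
    rw [PySem.Dict.keys_foldl_modify_key refs yearOf PySem.Dict.empty
      (fun _ k => fun c => c.modify (alqOf k) 0 (· + 1)) PySem.Dict.empty]
    rw [PySem.Dict.keys_empty, PySem.Set.update_nil_left]
  have hsorted : Kd (refs.map yearOf) = PySem.List.sorted (perYearA refs).keys (fun y => y) := by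
    rw [Kd, hkeys]
  apply PySem.List.sorted_eq_of_perm_of_pairwise_lt
  · rw [hsorted]
    have hitems := PySem.Dict.items_eq_map_keys (perYearA refs) hknd PySem.Dict.empty
    rw [hitems]
    exact ((PySem.List.sorted_perm (perYearA refs).keys (fun y => y) false).map _)
  · rw [hsorted]
    rw [List.pairwise_map]
    have h1 := PySem.List.sorted_pairwise (perYearA refs).keys (fun y => y)
    have h2 : (PySem.List.sorted (perYearA refs).keys (fun y => y)).Nodup :=
      (PySem.List.sorted_perm (perYearA refs).keys (fun y => y) false).nodup_iff.mpr hknd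
    have h3 := List.Pairwise.and h1 h2
    exact h3.imp (fun h => lt_of_le_of_ne h.1 h.2)


-- ---- per-year helper lemmas ----

def gOf (refs : List String) (y : String) : List String :=
  PySem.List.sorted (AyOf refs y) (fun x => x)

theorem Kd_perm (l l' : List String) (h : l.Perm l') : Kd l = Kd l' := by
  apply PySem.List.sorted_eq_sorted_of_perm _ _ _ (fun a b hab => hab)
  rw [List.perm_ext_iff_of_nodup (PySem.Set.nodup_ofList l) (PySem.Set.nodup_ofList l')]
  intro a
  rw [PySem.Set.mem_ofList, PySem.Set.mem_ofList]
  exact h.mem_iff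

theorem count_Ay (refs : List String) (y a : String) :
    (AyOf refs y).count a = refs.countP (fun k => yearOf k == y && alqOf k == a) := by
  rw [AyOf, List.count_eq_countP, List.countP_map, List.countP_filter, List.countP_map]
  apply List.countP_congr
  intro r _
  show ((alqOf r == a) && (yearOf r == y)) = true ↔ _
  rw [Bool.and_comm]

theorem mem_Ay_iff (refs : List String) (y X : String) :
    X ∈ AyOf refs y ↔ refs.countP (fun k => yearOf k == y && alqOf k == X) ≠ 0 := by
  rw [← count_Ay]
  constructor
  · intro h
    exact Nat.pos_iff_ne_zero.mp (List.count_pos_iff.mpr h)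
  · intro h
    exact List.count_pos_iff.mp (Nat.pos_of_ne_zero h)

theorem efy_eq (refs : List String) (y : String) :
    (refs.countP (fun k => yearOf k == y && alqOf k == "E") : Int)
      + (refs.countP (fun k => yearOf k == y && alqOf k == "L") : Int)
      + (refs.countP (fun k => yearOf k == y && alqOf k == "M") : Int)
      + (refs.countP (fun k => yearOf k == y && alqOf k == "I") : Int)
      + (refs.countP (fun k => yearOf k == y && alqOf k == "H") : Int)
    = ((Kd (AyOf refs y)).map
        (fun k => if k ∈ fiveL then ((AyOf refs y).count k : Int) else 0)).sum := by
  have hL : (refs.countP (fun k => yearOf k == y && alqOf k == "E") : Int)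
      + (refs.countP (fun k => yearOf k == y && alqOf k == "L") : Int)
      + (refs.countP (fun k => yearOf k == y && alqOf k == "M") : Int)
      + (refs.countP (fun k => yearOf k == y && alqOf k == "I") : Int)
      + (refs.countP (fun k => yearOf k == y && alqOf k == "H") : Int)
      = ((AyOf refs y).countP (fun a => decide (a ∈ fiveL)) : Int) := by
    rw [← count_Ay, ← count_Ay, ← count_Ay, ← count_Ay, ← count_Ay, ← count5]
    push_cast; ring
  rw [hL]
  have hR : ((Kd (AyOf refs y)).map
        (fun k => if k ∈ fiveL then ((AyOf refs y).count k : Int) else 0)).sum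
      = (((Kd (AyOf refs y)).filter (fun a => decide (a ∈ fiveL))).map
          (fun k => ((AyOf refs y).count k : Int))).sum := by
    rw [← sum_ite_filter]
    apply congrArg
    apply List.map_congr_left
    intro k _
    by_cases hk : k ∈ fiveL
    · simp [hk]
    · simp [hk]
  rw [hR]
  have hperm : ((Kd (AyOf refs y)).filter (fun a => decide (a ∈ fiveL))).Perm
      ((PySem.Set.ofList (AyOf refs y)).filter (fun a => decide (a ∈ fiveL))) :=
    (PySem.List.sorted_perm _ _ false).filter _
  rw [(hperm.map _).sum_eq, F2core]

theorem src_eq (refs : List String) (y : String) :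
    (if (refs.countP (fun k => yearOf k == y && alqOf k == "E") : Int) ≠ 0 then (1:Int) else 0) * 2
      + (if (refs.countP (fun k => yearOf k == y && alqOf k == "L") : Int) ≠ 0 then (1:Int) else 0) * 2
      + (if (refs.countP (fun k => yearOf k == y && alqOf k == "M") : Int) ≠ 0 then (1:Int) else 0) * 2
      + (if (refs.countP (fun k => yearOf k == y && alqOf k == "I") : Int) ≠ 0 then (1:Int) else 0) * 2
      + (if (refs.countP (fun k => yearOf k == y && alqOf k == "H") : Int) ≠ 0 then (1:Int) else 0) * 1
    = ((Kd (AyOf refs y)).map wOf).sum := by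
  rw [sumw _ (Kd_nodup _)]
  have hm : ∀ X : String, ((refs.countP (fun k => yearOf k == y && alqOf k == X) : Int) ≠ 0)
      ↔ X ∈ Kd (AyOf refs y) := by
    intro X
    rw [mem_Kd, mem_Ay_iff]
    exact_mod_cast Iff.rfl
  have hX : ∀ X : String,
      (if (refs.countP (fun k => yearOf k == y && alqOf k == X) : Int) ≠ 0 then (1:Int) else 0)
        = (if X ∈ Kd (AyOf refs y) then (1:Int) else 0) := by
    intro X
    by_cases h : X ∈ Kd (AyOf refs y)
    · rw [if_pos h, if_pos ((hm X).mpr h)]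
    · rw [if_neg h, if_neg (fun hc => h ((hm X).mp hc))]
  rw [hX "E", hX "L", hX "M", hX "I", hX "H"]

theorem gOf_ne_nil {refs : List String} {y : String} (h : y ∈ refs.map yearOf) :
    gOf refs y ≠ [] := by
  rw [gOf, ne_eq, PySem.List.sorted_eq_nil_iff]
  obtain ⟨r, hr, rfl⟩ := List.mem_map.mp h
  intro hnil
  have : pairF r ∈ (refs.map pairF).filter (fun p => p.1 == yearOf r) := by
    rw [List.mem_filter]
    exact ⟨List.mem_map.mpr ⟨r, hr, rfl⟩, by simp [pairF]⟩
  have : (pairF r).2 ∈ AyOf refs (yearOf r) := List.mem_map.mpr ⟨pairF r, this, rfl⟩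
  rw [hnil] at this
  simp at this

theorem pw_years (Y : List String) (g : String → List String) (hpw : Y.Pairwise (· < ·))
    (hg : ∀ y, (g y).Pairwise (· ≤ ·)) :
    (Y.flatMap (fun y => (g y).map (fun a => (y, a)))).Pairwise
      (fun (a b : String × String) => a.1 < b.1 ∨ (a.1 = b.1 ∧ a.2 ≤ b.2)) := by
  induction Y with
  | nil => simp
  | cons y t ih =>
    rw [List.flatMap_cons, List.pairwise_append]
    refine ⟨?_, ih hpw.of_cons, ?_⟩
    · rw [List.pairwise_map]
      exact (hg y).imp (fun h => Or.inr ⟨rfl, h⟩)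
    · intro a ha b hb
      obtain ⟨x, _, rfl⟩ := List.mem_map.mp ha
      obtain ⟨y', hy', hb'⟩ := List.mem_flatMap.mp hb
      obtain ⟨x', _, rfl⟩ := List.mem_map.mp hb'
      exact Or.inl (List.rel_of_pairwise_cons hpw hy')

-- B's sorted (year, alq) pair list is the concatenation of the per-year groups
theorem eq2 (refs : List String) :
    PySem.List.sorted2 (refs.map pairF) (·.1) (·.2)
      = (Kd (refs.map yearOf)).flatMap (fun y => (gOf refs y).map (fun a => (y, a))) := by
  apply sorted2_pairs_eq
  · have h1 : ∀ y ∈ Kd (refs.map yearOf),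
        ((gOf refs y).map (fun a => (y, a))).Perm ((refs.map pairF).filter (fun p => p.1 == y)) := by
      intro y _
      have hp : (gOf refs y).Perm (AyOf refs y) := PySem.List.sorted_perm _ _ false
      refine (hp.map _).trans ?_
      rw [AyOf, List.map_map]
      have : ((refs.map pairF).filter (fun p => p.1 == y)).map ((fun a => (y, a)) ∘ (·.2))
          = ((refs.map pairF).filter (fun p => p.1 == y)).map (fun p => p) := by
        apply List.map_congr_left
        intro p hp'
        have := List.of_mem_filter hp'
        have hpy : p.1 = y := by simpa using this
        show (y, p.2) = p
        rw [← hpy]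
      rw [this, List.map_id']
    refine (permflat _ _ _ h1).trans ?_
    apply part_perm _ _ (Kd_nodup _)
    intro p hp
    obtain ⟨r, hr, rfl⟩ := List.mem_map.mp hp
    exact mem_Kd.mpr (List.mem_map.mpr ⟨r, hr, rfl⟩)
  · exact pw_years _ _ (Kd_pairwise_lt _) (fun y => PySem.List.sorted_pairwise _ _)

-- ===== VERDICT (by name: the statement is the Claim_ definition above) =====
theorem validate_math_spec : Claim_equal_validate_math := by
  intro rows _ hpre
  unfold Spec_validate_math validate_math validate_math_alt
  have hpre' : ∀ k ∈ rows.map (fun r => r.2.1), k ≠ "" := by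
    intro k hk
    obtain ⟨r, hr, rfl⟩ := List.mem_map.mp hk
    exact hpre r hr
  -- A's single pass builds the entry counter and the nested per-year dict
  have hA : rows.foldl
      (fun (s : PySem.Dict String Int × PySem.Dict String (PySem.Dict String Int)) r =>
        (s.1.modify r.2.1 0 (· + 1),
         s.2.modify (yearOf r.2.1) PySem.Dict.empty (fun c => c.modify (alqOf r.2.1) 0 (· + 1))))
      (PySem.Dict.empty, PySem.Dict.empty)
      = (PySem.Dict.counter (rows.map (fun r => r.2.1)), perYearA (rows.map (fun r => r.2.1))) := by
    rw [PySem.List.foldl_prod_mk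
      (f := fun (d : PySem.Dict String Int) (r : Int × String × String × String) => d.modify r.2.1 0 (· + 1))
      (g := fun (d : PySem.Dict String (PySem.Dict String Int)) (r : Int × String × String × String) =>
        d.modify (yearOf r.2.1) PySem.Dict.empty (fun c => c.modify (alqOf r.2.1) 0 (· + 1)))]
    rw [PySem.Dict.counter_eq_foldl, List.foldl_map, perYearA, List.foldl_map]
  simp only [hA]
  -- shared names
  have hpF : (fun r => (yearOf r, alqOf r)) = pairF := rfl
  rw [hpF]
  -- the entries pass: A's fold over the sorted counter items = B's run scan of the sorted refs
  have hEQ1 : PySem.List.sorted2 (PySem.Dict.counter (rows.map (fun r => r.2.1))).items (·.1) (·.2)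
      = (Kd (rows.map (fun r => r.2.1))).map
          (fun k => (k, ((rows.map (fun r => r.2.1)).count k : Int))) := by
    apply sorted2_pairs_eq
    · rw [PySem.Dict.items_counter]
      exact (PySem.List.sorted_perm _ _ false).map _
    · rw [List.pairwise_map]
      exact (Kd_pairwise_lt _).imp (fun h => Or.inl h)
  have herr : scanEntriesB (PySem.List.sorted (rows.map (fun r => r.2.1)) (fun x => x)) []
      = (PySem.List.sorted2 (PySem.Dict.counter (rows.map (fun r => r.2.1))).items (·.1) (·.2)).foldl
          (fun errs p =>
            let expected : Int := if alqOf p.1 = "H" then 1 else 2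
            if p.2 ≠ expected then
              errs ++ [p.1 ++ " must produce " ++ PySem.Int.toStr expected ++ " split row(s); found "
                       ++ PySem.Int.toStr p.2 ++ "."]
            else errs) [] := by
    rw [hEQ1, List.foldl_map, flat_eq, flatRep]
    exact scan1 _ _ _ (Kd_pairwise_lt _) (fun k hk => List.count_pos_iff.mpr (mem_Kd.mp hk))
  rw [← herr]
  -- the per-year pass
  rw [items_sorted, eq2, List.foldl_map]
  have hYeq : Kd ((rows.map (fun r => r.2.1)).map yearOf)
      = Kd ((PySem.List.sorted (rows.map (fun r => r.2.1)) (fun x => x)).map yearOf) :=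
    Kd_perm _ _ ((PySem.List.sorted_perm _ _ false).map yearOf).symm
  rw [hYeq]
  rw [scany _ _ _ (Kd_pairwise_lt _)
    (fun y hy => gOf_ne_nil (mem_Kd.mp hy))]
  have hbody := PySem.List.foldl_congr_mem
    (Kd ((PySem.List.sorted (rows.map (fun r => r.2.1)) (fun x => x)).map yearOf))
    (fun (acc : List String × Int) y =>
      let counts := (perYearA (rows.map (fun r => r.2.1))).getD y PySem.Dict.empty
      let expectedForYear : Int := counts.getD "E" 0 + counts.getD "L" 0 + counts.getD "M" 0
        + counts.getD "I" 0 + counts.getD "H" 0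
      let sourceExpected : Int := (if counts.getD "E" 0 ≠ 0 then 1 else 0) * 2
        + (if counts.getD "L" 0 ≠ 0 then 1 else 0) * 2
        + (if counts.getD "M" 0 ≠ 0 then 1 else 0) * 2
        + (if counts.getD "I" 0 ≠ 0 then 1 else 0) * 2
        + (if counts.getD "H" 0 ≠ 0 then 1 else 0) * 1
      (if expectedForYear ≠ sourceExpected then
        acc.1 ++ ["EPB " ++ y ++ " row count is wrong; expected " ++ PySem.Int.toStr sourceExpected
                  ++ ", found " ++ PySem.Int.toStr expectedForYear ++ "."]
       else acc.1,
       acc.2 + sourceExpected))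
    (fun (acc : List String × Int) y =>
      let st := (gOf (PySem.List.sorted (rows.map (fun r => r.2.1)) (fun x => x)) y).foldl
        innerStep (0, 0, none)
      ((if st.1 ≠ st.2.1 then
          acc.1 ++ ["EPB " ++ y ++ " row count is wrong; expected " ++ PySem.Int.toStr st.2.1
                    ++ ", found " ++ PySem.Int.toStr st.1 ++ "."]
        else acc.1),
       acc.2 + st.2.1))
    (scanEntriesB (PySem.List.sorted (rows.map (fun r => r.2.1)) (fun x => x)) [], 0)
    ?hperY
  case hperY =>
    intro acc y _
    -- evaluate B's inner fold
    have hst : (gOf (PySem.List.sorted (rows.map (fun r => r.2.1)) (fun x => x)) y).foldl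
        innerStep (0, 0, none)
        = (((Kd (AyOf (PySem.List.sorted (rows.map (fun r => r.2.1)) (fun x => x)) y)).map
              (fun k => if k ∈ fiveL then
                ((AyOf (PySem.List.sorted (rows.map (fun r => r.2.1)) (fun x => x)) y).count k : Int)
              else 0)).sum,
           ((Kd (AyOf (PySem.List.sorted (rows.map (fun r => r.2.1)) (fun x => x)) y)).map wOf).sum,
           prevAfter (Kd (AyOf (PySem.List.sorted (rows.map (fun r => r.2.1)) (fun x => x)) y)) none) := by
      rw [gOf, flat_eq, flatRep]
      rw [inner_eval _ _ _ (Kd_nodup _)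
        (fun k hk => List.count_pos_iff.mpr (mem_Kd.mp hk))
        (fun k _ => by simp)]
      simp
    simp only [hst]
    -- A's per-year values equal B's
    have hcntP : ∀ a : String,
        ((rows.map (fun r => r.2.1)).countP (fun k => yearOf k == y && alqOf k == a) : Int)
          = ((PySem.List.sorted (rows.map (fun r => r.2.1)) (fun x => x)).countP
              (fun k => yearOf k == y && alqOf k == a) : Int) := by
      intro a
      exact_mod_cast congrArg Nat.cast
        (List.Perm.countP_eq _ (PySem.List.sorted_perm _ _ false)).symm
    have hEFY := efy_eq (PySem.List.sorted (rows.map (fun r => r.2.1)) (fun x => x)) y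
    have hSRC := src_eq (PySem.List.sorted (rows.map (fun r => r.2.1)) (fun x => x)) y
    simp only [hterm, hcntP, hEFY, hSRC]
  rw [hbody]
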